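-- pv_equiv track=rewrite | github.com/Arsen1302/Code-copy-detector | TestData/solutions/problem_1274_1.py | solution_1274_1
-- ===== SOURCE A (Python) =====
-- def solution_1274_1(s: str, minJump: int, maxJump: int) -> bool:
--     prefix = [0, 1]
--     for i in range(1, len(s)):
--         prefix.append(prefix[-1])
--         lo = max(0, i-maxJump)
--         hi = max(0, i-minJump+1)
--         if s[i] == "0" and prefix[hi] - prefix[lo] > 0: prefix[-1] += 1
--     return prefix[-1] > prefix[-2]
-- ===== SOURCE B (Python) =====
-- def solution_1274_1(s: str, minJump: int, maxJump: int) -> bool: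
--     # Event-based sweep: each reachable index i marks the future window
--     # [i+minJump, i+maxJump] in a difference array; a running sum of the
--     # difference array tells whether any reachable index can jump to i.
--     n = len(s)
--     diff = [0] * (n + 1)
--     cnt = 0
--     ok = False
--     for i in range(n):
--         cnt += diff[i]
--         ok = i == 0 or (s[i] == "0" and cnt > 0)
--         if ok:
--             lo = max(i + 1, i + minJump)  # only indices ahead of i matter
--             hi = min(n - 1, i + maxJump)
--             if lo <= hi:
--                 diff[lo] += 1
--                 diff[hi + 1] -= 1
--     return n == 0 or ok
-- ===== Notes on version B (the rewrite author's own statement) =====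
-- stated objective: alternative
-- what changed: B replaces A's per-index prefix-sum window query by an event-based sweep: each reachable index marks its future jump window [i+minJump, i+maxJump] in a preallocated difference array and a running sum decides reachability, instead of growing a prefix-count list and subtracting two of its entries per index.
import Mathlib
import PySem

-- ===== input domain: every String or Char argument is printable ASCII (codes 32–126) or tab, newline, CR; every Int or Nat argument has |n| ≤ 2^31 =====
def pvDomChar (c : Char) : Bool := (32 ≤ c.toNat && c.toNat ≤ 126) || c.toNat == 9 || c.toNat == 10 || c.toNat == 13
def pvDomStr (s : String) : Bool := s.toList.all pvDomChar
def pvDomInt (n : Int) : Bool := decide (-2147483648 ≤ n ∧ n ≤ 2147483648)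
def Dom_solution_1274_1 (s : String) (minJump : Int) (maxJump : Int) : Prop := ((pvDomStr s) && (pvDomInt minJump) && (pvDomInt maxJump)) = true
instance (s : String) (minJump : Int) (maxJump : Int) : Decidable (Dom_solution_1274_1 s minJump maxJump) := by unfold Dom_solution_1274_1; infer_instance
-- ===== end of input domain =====

-- B replaces A's per-index prefix-sum window query by an event-based difference-array sweep:
-- each reachable index marks its future jump window, and a running sum decides reachability.

-- ===== PORT A =====
-- loop body of A: prefix.append(prefix[-1]); window bounds; conditional increment of prefix[-1].
-- prefix is never empty and, under Pre_, every index taken is in range, so the pyGetD defaults are never used.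
def stepA (cs : List Char) (minJump : Int) (maxJump : Int) (p0 : List Int) (i : Int) : List Int :=
  let p := p0 ++ [PySem.List.pyGetD p0 (-1) 0]
  let lo := max 0 (i - maxJump)
  let hi := max 0 (i - minJump + 1)
  if (PySem.List.pyGet? cs i == some '0') && decide (0 < PySem.List.pyGetD p hi 0 - PySem.List.pyGetD p lo 0)
  then p.dropLast ++ [PySem.List.pyGetD p (-1) 0 + 1]
  else p

def solution_1274_1 (s : String) (minJump : Int) (maxJump : Int) : Bool :=
  let cs := s.toList
  let prefixL := (PySem.List.pyRange 1 (cs.length : Int)).foldl (stepA cs minJump maxJump) [0, 1]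
  decide (PySem.List.pyGetD prefixL (-2) 0 < PySem.List.pyGetD prefixL (-1) 0)

-- ===== PORT B =====
-- loop body of B: cnt += diff[i]; ok = i == 0 or (s[i] == "0" and cnt > 0); if ok, mark the
-- window [max(i+1,i+minJump), min(n-1,i+maxJump)] in the difference array.
-- diff[lo] += 1 / diff[hi+1] -= 1 use pySetD: exact here, since 1 ≤ lo ≤ hi+1 ≤ n < diff length.
def stepD (cs : List Char) (minJump : Int) (maxJump : Int) (n : Int)
    (st : List Int × Int × Bool) (i : Int) : List Int × Int × Bool :=
  let cnt := st.2.1 + PySem.List.pyGetD st.1 i 0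
  let ok := (i == 0) || ((PySem.List.pyGet? cs i == some '0') && decide (0 < cnt))
  if ok then
    let lo := max (i + 1) (i + minJump)
    let hi := min (n - 1) (i + maxJump)
    if lo ≤ hi then
      let d1 := PySem.List.pySetD st.1 lo (PySem.List.pyGetD st.1 lo 0 + 1)
      let d2 := PySem.List.pySetD d1 (hi + 1) (PySem.List.pyGetD d1 (hi + 1) 0 - 1)
      (d2, cnt, ok)
    else (st.1, cnt, ok)
  else (st.1, cnt, ok)

def solution_1274_1_alt (s : String) (minJump : Int) (maxJump : Int) : Bool :=
  let cs := s.toList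
  let n : Int := (cs.length : Int)
  let st := (PySem.List.pyRange 0 n).foldl (stepD cs minJump maxJump n)
      (List.replicate (cs.length + 1) 0, 0, false)
  (n == 0) || st.2.2

-- ===== PRECONDITION & SPEC =====
-- Pre_ is exactly the set of inputs on which A returns: with minJump ≤ -1 or maxJump ≤ -2 A indexes
-- prefix past its end and raises IndexError at the first i ≥ 1 with s[i] == '0'; if no such character
-- exists the indexing is never reached and A returns.
def Pre_solution_1274_1 (s : String) (minJump : Int) (maxJump : Int) : Prop :=
  (0 ≤ minJump ∧ -1 ≤ maxJump) ∨ '0' ∉ s.toList.tail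
instance (s : String) (minJump : Int) (maxJump : Int) : Decidable (Pre_solution_1274_1 s minJump maxJump) := by unfold Pre_solution_1274_1; infer_instance

def pvWitness_solution_1274_1 : String × Int × Int := ("0110", 1, 2)

def Spec_solution_1274_1 (s : String) (minJump : Int) (maxJump : Int) (out : Bool) : Prop := out = solution_1274_1_alt s minJump maxJump
instance (s : String) (minJump : Int) (maxJump : Int) (out : Bool) : Decidable (Spec_solution_1274_1 s minJump maxJump out) := by unfold Spec_solution_1274_1; infer_instance

-- ===== CLAIM (what is proved, stated in full; the proofs are below) =====
def Claim_equal_solution_1274_1 : Prop := ∀ (s : String) (minJump : Int) (maxJump : Int), Dom_solution_1274_1 s minJump maxJump → Pre_solution_1274_1 s minJump maxJump → Spec_solution_1274_1 s minJump maxJump (solution_1274_1 s minJump maxJump)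

-- ===== LEMMAS AND PROOFS =====

-- Proof-side reachability model: reach[0] = True; reach[i] = (s[i] == '0' and any(reach[lo:hi])).
-- Both ports are related to this model: A via its prefix-sum list (pfx), B via its sweep invariant.
def stepR (cs : List Char) (minJump : Int) (maxJump : Int) (r : List Bool) (i : Int) : List Bool :=
  let lo := max 0 (i - maxJump)
  let hi := max 0 (i - minJump + 1)
  r ++ [(PySem.List.pyGet? cs i == some '0') && (PySem.List.slice r (some lo) (some hi)).any id]

def Rfold (cs : List Char) (minJump : Int) (maxJump : Int) (m : Nat) : List Bool :=
  (PySem.List.pyRange 1 (m : Int)).foldl (stepR cs minJump maxJump) [true]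

-- pfx r = A's prefix list when the model list is r: entry k counts the trues among the first k entries.
def pfx (r : List Bool) : List Int :=
  (List.range (r.length + 1)).map (fun k => ((r.take k).count true : Int))

theorem pfx_eq (r : List Bool) :
    pfx r = (List.range r.length).map (fun k => ((r.take k).count true : Int)) ++ [(r.count true : Int)] := by
  simp [pfx, List.range_succ, List.take_length]

theorem pfx_append_singleton (r : List Bool) (b : Bool) :
    pfx (r ++ [b]) = pfx r ++ [(r.count true : Int) + (if b then 1 else 0)] := by
  unfold pfx
  rw [show (r ++ [b]).length + 1 = (r.length + 1) + 1 by simp]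
  rw [List.range_succ, List.map_append]
  congr 1
  · apply List.map_congr_left
    intro k hk
    rw [List.mem_range] at hk
    rw [List.take_append_of_le_length (by omega)]
  · simp only [List.map_cons, List.map_nil]
    rw [List.take_of_length_le (by simp)]
    cases b <;> simp [List.count_append]

theorem getD_pfx_concat (r : List Bool) (t : Int) (h0 : 0 ≤ t) (h1 : t ≤ (r.length : Int) + 1) :
    PySem.List.pyGetD (pfx r ++ [(r.count true : Int)]) t 0 = ((r.take t.toNat).count true : Int) := by
  rw [PySem.List.pyGetD_eq_getElem _ _ h0 (by simp [pfx]; omega)]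
  set k := t.toNat with hk
  have hkle : k ≤ r.length + 1 := by omega
  by_cases h : k < r.length + 1
  · rw [List.getElem_append_left (by simp [pfx]; omega)]
    simp [pfx]
  · have hke : k = r.length + 1 := by omega
    rw [List.getElem_append_right (by simp [pfx]; omega)]
    rw [List.take_of_length_le (by omega : r.length ≤ t.toNat)]
    simp [pfx]

theorem any_window (r : List Bool) (a b : Nat) :
    ((r.drop a).take (b - a)).any id = decide ((r.take a).count true < (r.take b).count true) := by
  by_cases hab : a ≤ b
  · have htake : r.take b = r.take a ++ (r.drop a).take (b - a) := by
      rw [← List.take_add]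
      congr 1; omega
    have hcnt : (r.take b).count true = (r.take a).count true + ((r.drop a).take (b - a)).count true := by
      rw [htake, List.count_append]
    by_cases h : ((r.drop a).take (b - a)).any id = true
    · rw [h]
      have : true ∈ (r.drop a).take (b - a) := by
        rcases List.any_eq_true.mp h with ⟨x, hx, hid⟩
        simpa [show x = true from by simpa using hid] using hx
      have := List.count_pos_iff.mpr this
      symm; rw [decide_eq_true_eq]; omega
    · rw [Bool.not_eq_true] at h
      rw [h]
      have : true ∉ (r.drop a).take (b - a) := by
        intro hm
        exact (Bool.not_eq_true _).mpr h (List.any_eq_true.mpr ⟨true, hm, rfl⟩)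
      have hz : ((r.drop a).take (b - a)).count true = 0 := by
        exact List.count_eq_zero.mpr this
      symm; rw [decide_eq_false_iff_not]; omega
  · have : b - a = 0 := by omega
    rw [this]
    have hsub : (r.take b).Sublist (r.take a) := by
      have : r.take b = (r.take a).take b := by rw [List.take_take]; congr 1; omega
      rw [this]; exact List.take_sublist _ _
    have := hsub.count_le true
    simp only [List.take_zero, List.any_nil]
    symm; rw [decide_eq_false_iff_not]; omega

theorem step_eq (cs : List Char) (minJump maxJump : Int)
    (hPre : (0 ≤ minJump ∧ -1 ≤ maxJump) ∨ '0' ∉ cs.tail)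
    (r : List Bool) (m : Nat) (hm : r.length = m) (h1 : 1 ≤ m) :
    stepA cs minJump maxJump (pfx r) (m : Int) = pfx (stepR cs minJump maxJump r (m : Int)) := by
  simp only [stepA, stepR]
  have hlast : PySem.List.pyGetD (pfx r) (-1) 0 = (r.count true : Int) := by
    rw [pfx_eq, PySem.List.pyGetD_neg_one_append_singleton]
  rw [hlast]
  have hlast2 : PySem.List.pyGetD (pfx r ++ [(r.count true : Int)]) (-1) 0 = (r.count true : Int) :=
    PySem.List.pyGetD_neg_one_append_singleton _ _ _
  rw [hlast2]
  set lo := max 0 ((m : Int) - maxJump) with hlo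
  set hi := max 0 ((m : Int) - minJump + 1) with hhi
  by_cases hchar : (PySem.List.pyGet? cs (m : Int) == some '0') = true
  · have hmem : '0' ∈ cs.tail := by
      rw [beq_iff_eq, PySem.List.pyGet?_natCast] at hchar
      have hidx : (cs.drop 1)[m-1]? = some '0' := by
        rw [List.getElem?_drop, show 1 + (m-1) = m by omega]
        exact hchar
      rw [← List.drop_one]
      exact List.mem_of_getElem? hidx
    have hcase : 0 ≤ minJump ∧ -1 ≤ maxJump := by
      rcases hPre with h | h
      · exact h
      · exact absurd hmem h
    have hlo0 : 0 ≤ lo := le_max_left _ _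
    have hhi0 : 0 ≤ hi := le_max_left _ _
    have hloB : lo ≤ (r.length : Int) + 1 := by rw [hlo]; omega
    have hhiB : hi ≤ (r.length : Int) + 1 := by rw [hhi]; omega
    rw [getD_pfx_concat r hi hhi0 hhiB, getD_pfx_concat r lo hlo0 hloB]
    rw [PySem.List.slice_toNat r hlo0 hhi0, any_window r lo.toNat hi.toNat]
    have hdec : decide (0 < ((r.take hi.toNat).count true : Int) - ((r.take lo.toNat).count true : Int))
        = decide ((r.take lo.toNat).count true < (r.take hi.toNat).count true) := by
      rw [decide_eq_decide]; omega
    rw [hdec, hchar, Bool.true_and]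
    by_cases hc : ((r.take lo.toNat).count true < (r.take hi.toNat).count true)
    · rw [pfx_append_singleton]
      simp [hc]
    · rw [pfx_append_singleton]
      simp [hc]
  · rw [Bool.not_eq_true] at hchar
    rw [hchar]
    rw [pfx_append_singleton]
    simp

theorem pfx_len (r : List Bool) : (pfx r).length = r.length + 1 := by
  simp [pfx]

theorem pfx_single : pfx [true] = [0, 1] := by decide

theorem loop_inv (cs : List Char) (minJump maxJump : Int)
    (hPre : (0 ≤ minJump ∧ -1 ≤ maxJump) ∨ '0' ∉ cs.tail) (m : Nat) :
    (PySem.List.pyRange 1 (m : Int)).foldl (stepA cs minJump maxJump) [0, 1]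
      = pfx (Rfold cs minJump maxJump m)
    ∧ (Rfold cs minJump maxJump m).length = max m 1 := by
  induction m with
  | zero =>
      have h : PySem.List.pyRange 1 ((0 : Nat) : Int) = [] := by decide
      unfold Rfold
      rw [h]
      exact ⟨pfx_single.symm, by simp⟩
  | succ m ih =>
      by_cases hm : 1 ≤ m
      · have hr : PySem.List.pyRange 1 ((m + 1 : Nat) : Int)
            = PySem.List.pyRange 1 (m : Int) ++ [(m : Int)] := by
          rw [show ((m + 1 : Nat) : Int) = (m : Int) + 1 by push_cast; ring]
          exact PySem.List.pyRange_one_succ_right (by exact_mod_cast hm)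
        unfold Rfold at ih ⊢
        rw [hr, List.foldl_append, List.foldl_append]
        obtain ⟨hA, hL⟩ := ih
        rw [hA]
        simp only [List.foldl_cons, List.foldl_nil]
        constructor
        · exact step_eq cs minJump maxJump hPre _ m (by omega) hm
        · simp only [stepR, List.length_append, List.length_cons, List.length_nil]
          omega
      · have hm0 : m = 0 := by omega
        subst hm0
        have h : PySem.List.pyRange 1 ((1 : Nat) : Int) = [] := by decide
        unfold Rfold
        rw [h]
        exact ⟨pfx_single.symm, by simp⟩

theorem final_eq (r : List Bool) (h : r ≠ []) :
    decide (PySem.List.pyGetD (pfx r) (-2) 0 < PySem.List.pyGetD (pfx r) (-1) 0)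
      = PySem.List.pyGetD r (-1) true := by
  have hlast : PySem.List.pyGetD (pfx r) (-1) 0 = (r.count true : Int) := by
    rw [pfx_eq, PySem.List.pyGetD_neg_one_append_singleton]
  have hn : 0 < r.length := List.length_pos_of_ne_nil h
  have h2 : PySem.List.pyGetD (pfx r) (-2) 0 = ((r.take (r.length - 1)).count true : Int) := by
    rw [PySem.List.pyGetD_neg_ofNat (pfx r) 2 0 (by omega) (by rw [pfx_len]; omega)]
    simp [pfx]
  have hx : r.dropLast ++ [r.getLast h] = r := List.dropLast_append_getLast h
  have hcnt : r.count true = r.dropLast.count true + (if r.getLast h then 1 else 0) := by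
    conv_lhs => rw [← hx]
    rw [List.count_append]
    cases hg : r.getLast h <;> simp
  have hdl : r.take (r.length - 1) = r.dropLast := List.dropLast_eq_take.symm
  have hgl : PySem.List.pyGetD r (-1) true = r.getLast h := PySem.List.pyGetD_neg_one r true h
  rw [hlast, h2, hdl, hgl]
  cases hg : r.getLast h
  · rw [hg] at hcnt
    rw [decide_eq_false_iff_not]
    simp at hcnt
    omega
  · rw [hg] at hcnt
    rw [decide_eq_true_eq]
    simp at hcnt
    omega

-- ---------- B-side proof apparatus ----------

-- window bounds marked by a reachable index j in B's sweep
def loJ (minJump : Int) (j : Int) : Int := max (j + 1) (j + minJump)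
def hiJ (maxJump : Int) (n : Int) (j : Int) : Int := min (n - 1) (j + maxJump)

-- the final model reachability value at index j
def getR (cs : List Char) (minJump maxJump : Int) (j : Nat) : Bool :=
  (Rfold cs minJump maxJump cs.length).getD j false

-- number of reachable indices whose marked window covers i
def Wfn (cs : List Char) (minJump maxJump : Int) (i : Int) : Nat :=
  (List.range cs.length).countP (fun j =>
    getR cs minJump maxJump j &&
      decide (loJ minJump (j : Int) ≤ i ∧ i ≤ hiJ maxJump (cs.length : Int) (j : Int)))

-- B's difference array after m iterations
def DMm (cs : List Char) (minJump maxJump : Int) (m : Nat) : List Int :=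
  (List.range (cs.length + 1)).map (fun (k : Nat) =>
    (((List.range m).countP (fun j =>
        getR cs minJump maxJump j &&
          decide (loJ minJump (j : Int) = (k : Int) ∧
            loJ minJump (j : Int) ≤ hiJ maxJump (cs.length : Int) (j : Int)))) : Int)
  - (((List.range m).countP (fun j =>
        getR cs minJump maxJump j &&
          decide (hiJ maxJump (cs.length : Int) (j : Int) + 1 = (k : Int) ∧
            loJ minJump (j : Int) ≤ hiJ maxJump (cs.length : Int) (j : Int)))) : Int))

theorem Rfold_succ (cs : List Char) (minJump maxJump : Int) (m : Nat) (hm : 1 ≤ m) :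
    Rfold cs minJump maxJump (m + 1)
      = stepR cs minJump maxJump (Rfold cs minJump maxJump m) (m : Int) := by
  unfold Rfold
  rw [show ((m + 1 : Nat) : Int) = (m : Int) + 1 by push_cast; ring]
  rw [PySem.List.pyRange_one_succ_right (by exact_mod_cast hm), List.foldl_append]
  simp

theorem Rfold_one (cs : List Char) (minJump maxJump : Int) :
    Rfold cs minJump maxJump 1 = [true] := by
  unfold Rfold
  norm_num [PySem.List.pyRange_one_eq_nil]

theorem Rfold_prefix (cs : List Char) (minJump maxJump : Int) (m m' : Nat) (h : m ≤ m') :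
    Rfold cs minJump maxJump m <+: Rfold cs minJump maxJump m' := by
  induction m' with
  | zero => have : m = 0 := by omega
            subst this; exact List.prefix_rfl
  | succ m' ih =>
      by_cases he : m = m' + 1
      · subst he; exact List.prefix_rfl
      · have hle : m ≤ m' := by omega
        by_cases h1 : 1 ≤ m'
        · refine (ih hle).trans ?_
          rw [Rfold_succ cs minJump maxJump m' h1]
          simp [stepR]
        · have : m' = 0 := by omega
          subst this
          have : m = 0 := by omega
          subst this
          rw [Rfold_one]
          unfold Rfold
          norm_num [PySem.List.pyRange_one_eq_nil]

theorem Rfold_len (cs : List Char) (minJump maxJump : Int) (m : Nat) :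
    (Rfold cs minJump maxJump m).length = max m 1 := by
  induction m with
  | zero => unfold Rfold; norm_num [PySem.List.pyRange_one_eq_nil]
  | succ m ih =>
      by_cases h1 : 1 ≤ m
      · rw [Rfold_succ cs minJump maxJump m h1]
        simp only [stepR, List.length_append, List.length_cons, List.length_nil]
        omega
      · have : m = 0 := by omega
        subst this
        rw [Rfold_one]; simp

theorem getR_zero (cs : List Char) (minJump maxJump : Int) :
    getR cs minJump maxJump 0 = true := by
  unfold getR
  by_cases hn : 1 ≤ cs.length
  · have hp := Rfold_prefix cs minJump maxJump 1 cs.length hn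
    rw [Rfold_one] at hp
    obtain ⟨t, ht⟩ := hp
    rw [← ht]
    simp
  · have : cs.length = 0 := by omega
    rw [this]
    unfold Rfold
    norm_num [PySem.List.pyRange_one_eq_nil]

theorem pv_getD_append_cons {α : Type} (l t : List α) (v d : α) (n : Nat)
    (h : n = l.length) : (l ++ v :: t).getD n d = v := by
  subst h
  simp [List.getD_eq_getElem?_getD]

theorem getR_entry (cs : List Char) (minJump maxJump : Int) (i : Nat)
    (h1 : 1 ≤ i) (h2 : i < cs.length) :
    getR cs minJump maxJump i
      = ((PySem.List.pyGet? cs (i : Int) == some '0') &&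
          (PySem.List.slice (Rfold cs minJump maxJump i)
            (some (max 0 ((i : Int) - maxJump))) (some (max 0 ((i : Int) - minJump + 1)))).any id) := by
  unfold getR
  have hlen : (Rfold cs minJump maxJump i).length = i := by
    rw [Rfold_len]; omega
  have hp := Rfold_prefix cs minJump maxJump (i + 1) cs.length (by omega)
  obtain ⟨t, ht⟩ := hp
  rw [← ht, Rfold_succ cs minJump maxJump i h1]
  simp only [stepR, List.append_assoc, List.cons_append, List.nil_append]
  exact pv_getD_append_cons _ _ _ _ _ hlen.symm

theorem Rfold_zero (cs : List Char) (minJump maxJump : Int) :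
    Rfold cs minJump maxJump 0 = [true] := by
  unfold Rfold
  norm_num [PySem.List.pyRange_one_eq_nil]

theorem getR_eq_getD (cs : List Char) (minJump maxJump : Int) (m j : Nat)
    (hj : j < m) (hm : m ≤ cs.length) :
    getR cs minJump maxJump j = (Rfold cs minJump maxJump m).getD j false := by
  unfold getR
  obtain ⟨t, ht⟩ := Rfold_prefix cs minJump maxJump m cs.length hm
  rw [← ht]
  have hlen : j < (Rfold cs minJump maxJump m).length := by rw [Rfold_len]; omega
  rw [List.getD_eq_getElem?_getD, List.getD_eq_getElem?_getD,
    List.getElem?_append_left hlen]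

theorem any_drop_take_iff (r : List Bool) (a c : Nat) :
    ((r.drop a).take c).any id = true
      ↔ ∃ j, a ≤ j ∧ j < a + c ∧ ∃ hj : j < r.length, r[j] = true := by
  rw [List.any_eq_true]
  constructor
  · rintro ⟨x, hx, hid⟩
    have hxt : x = true := by simpa using hid
    subst hxt
    rw [List.mem_iff_getElem] at hx
    obtain ⟨k, hk, hkv⟩ := hx
    have hlt : k < c ∧ a + k < r.length := by
      simp only [List.length_take, List.length_drop] at hk
      omega
    refine ⟨a + k, by omega, by omega, by omega, ?_⟩
    rw [List.getElem_take, List.getElem_drop] at hkv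
    exact hkv
  · rintro ⟨j, h1, h2, hj, hv⟩
    refine ⟨true, ?_, rfl⟩
    rw [List.mem_iff_getElem]
    refine ⟨j - a, by simp only [List.length_take, List.length_drop]; omega, ?_⟩
    rw [List.getElem_take, List.getElem_drop]
    simp_rw [Nat.add_sub_cancel' h1]
    exact hv

-- the window test over the model list equals positivity of the coverage count
theorem any_slice_eq_Wfn (cs : List Char) (minJump maxJump : Int) (hmin : 0 ≤ minJump)
    (i : Nat) (h1 : 1 ≤ i) (h2 : i < cs.length) :
    (PySem.List.slice (Rfold cs minJump maxJump i)
        (some (max 0 ((i : Int) - maxJump))) (some (max 0 ((i : Int) - minJump + 1)))).any id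
      = decide (0 < Wfn cs minJump maxJump (i : Int)) := by
  have hlen : (Rfold cs minJump maxJump i).length = i := by rw [Rfold_len]; omega
  have ha0 : (0 : Int) ≤ max 0 ((i : Int) - maxJump) := le_max_left _ _
  have hb0 : (0 : Int) ≤ max 0 ((i : Int) - minJump + 1) := le_max_left _ _
  rw [PySem.List.slice_toNat _ ha0 hb0, Bool.eq_iff_iff, any_drop_take_iff,
    decide_eq_true_iff]
  rw [show (0 < Wfn cs minJump maxJump (i : Int)) ↔
      ∃ j ∈ List.range cs.length, (fun j => getR cs minJump maxJump j &&
        decide (loJ minJump (j : Int) ≤ (i : Int) ∧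
          (i : Int) ≤ hiJ maxJump (cs.length : Int) (j : Int))) j = true from
    List.countP_pos_iff]
  constructor
  · rintro ⟨j, hja, hjb, hji, hv⟩
    rw [hlen] at hji
    refine ⟨j, List.mem_range.mpr (by omega), ?_⟩
    simp only [Bool.and_eq_true, decide_eq_true_eq]
    refine ⟨?_, ?_⟩
    · rw [getR_eq_getD cs minJump maxJump i j hji (le_of_lt h2),
        List.getD_eq_getElem _ _ (by omega)]
      exact hv
    · simp only [loJ, hiJ]
      omega
  · rintro ⟨j, hjr, hp⟩
    rw [List.mem_range] at hjr
    simp only [Bool.and_eq_true, decide_eq_true_eq, loJ, hiJ] at hp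
    obtain ⟨hg, hlo, hhi⟩ := hp
    have hji : j < i := by omega
    refine ⟨j, by omega, by omega, by omega, ?_⟩
    rw [← List.getD_eq_getElem _ false (by omega),
      ← getR_eq_getD cs minJump maxJump i j hji (le_of_lt h2)]
    exact hg

theorem Wfn_nonpos (cs : List Char) (minJump maxJump : Int) (i : Int) (h : i ≤ 0) :
    Wfn cs minJump maxJump i = 0 := by
  unfold Wfn
  apply List.countP_eq_zero.mpr
  intro j hj
  simp only [Bool.and_eq_true, decide_eq_true_eq, not_and]
  intro _ hc
  exfalso
  have h0 : (0 : Int) ≤ (j : Int) := Int.natCast_nonneg j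
  have hlo : loJ minJump (j : Int) ≤ i := hc
  simp only [loJ] at hlo
  omega

theorem countP_range_restrict (p : Nat → Bool) (m n : Nat) (hmn : m ≤ n)
    (h : ∀ j, p j = true → j < m) :
    (List.range n).countP p = (List.range m).countP p := by
  have hsplit : n = m + (n - m) := by omega
  rw [hsplit, List.range_add, List.countP_append]
  have hz : ((List.range (n - m)).map (m + ·)).countP p = 0 := by
    apply List.countP_eq_zero.mpr
    intro a ha
    rw [List.mem_map] at ha
    obtain ⟨k, -, hk⟩ := ha
    intro hpa
    have := h a hpa
    omega
  omega

theorem countP_swap (l : List Nat) (p q e v : Nat → Bool)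
    (h : ∀ a ∈ l, (if p a then 1 else 0) + (if v a then 1 else 0)
        = ((if q a then 1 else 0) + (if e a then 1 else 0) : Nat)) :
    l.countP p + l.countP v = l.countP q + l.countP e := by
  induction l with
  | nil => simp
  | cons x xs ih =>
      simp only [List.countP_cons]
      have hx := h x (List.mem_cons_self)
      have ihh := ih (fun a ha => h a (List.mem_cons_of_mem x ha))
      split_ifs at hx ⊢ <;> omega

-- counting step: the diff entry at m is exactly the window-count change from m-1 to m
theorem cnt_step (cs : List Char) (minJump maxJump : Int)
    (m : Nat) (hm : m < cs.length) :
    (Wfn cs minJump maxJump (m : Int) : Int)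
      = Wfn cs minJump maxJump ((m : Int) - 1)
        + ((((List.range m).countP (fun j =>
            getR cs minJump maxJump j &&
              decide (loJ minJump (j : Int) = (m : Int) ∧
                loJ minJump (j : Int) ≤ hiJ maxJump (cs.length : Int) (j : Int)))) : Int)
          - (((List.range m).countP (fun j =>
            getR cs minJump maxJump j &&
              decide (hiJ maxJump (cs.length : Int) (j : Int) + 1 = (m : Int) ∧
                loJ minJump (j : Int) ≤ hiJ maxJump (cs.length : Int) (j : Int)))) : Int)) := by
  have hE : (List.range m).countP (fun j =>
      getR cs minJump maxJump j &&
        decide (loJ minJump (j : Int) = (m : Int) ∧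
          loJ minJump (j : Int) ≤ hiJ maxJump (cs.length : Int) (j : Int)))
      = (List.range cs.length).countP (fun j =>
      getR cs minJump maxJump j &&
        decide (loJ minJump (j : Int) = (m : Int) ∧
          loJ minJump (j : Int) ≤ hiJ maxJump (cs.length : Int) (j : Int))) := by
    symm
    apply countP_range_restrict _ m cs.length (le_of_lt hm)
    intro j hj
    simp only [Bool.and_eq_true, decide_eq_true_eq, loJ, hiJ] at hj
    omega
  have hV : (List.range m).countP (fun j =>
      getR cs minJump maxJump j &&
        decide (hiJ maxJump (cs.length : Int) (j : Int) + 1 = (m : Int) ∧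
          loJ minJump (j : Int) ≤ hiJ maxJump (cs.length : Int) (j : Int)))
      = (List.range cs.length).countP (fun j =>
      getR cs minJump maxJump j &&
        decide (hiJ maxJump (cs.length : Int) (j : Int) + 1 = (m : Int) ∧
          loJ minJump (j : Int) ≤ hiJ maxJump (cs.length : Int) (j : Int))) := by
    symm
    apply countP_range_restrict _ m cs.length (le_of_lt hm)
    intro j hj
    simp only [Bool.and_eq_true, decide_eq_true_eq, loJ, hiJ] at hj
    omega
  rw [hE, hV]
  unfold Wfn
  have hkey := countP_swap (List.range cs.length)
    (fun j => getR cs minJump maxJump j &&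
      decide (loJ minJump (j : Int) ≤ (m : Int) ∧
        (m : Int) ≤ hiJ maxJump (cs.length : Int) (j : Int)))
    (fun j => getR cs minJump maxJump j &&
      decide (loJ minJump (j : Int) ≤ (m : Int) - 1 ∧
        (m : Int) - 1 ≤ hiJ maxJump (cs.length : Int) (j : Int)))
    (fun j => getR cs minJump maxJump j &&
      decide (loJ minJump (j : Int) = (m : Int) ∧
        loJ minJump (j : Int) ≤ hiJ maxJump (cs.length : Int) (j : Int)))
    (fun j => getR cs minJump maxJump j &&
      decide (hiJ maxJump (cs.length : Int) (j : Int) + 1 = (m : Int) ∧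
        loJ minJump (j : Int) ≤ hiJ maxJump (cs.length : Int) (j : Int)))
    (by
      intro a ha
      by_cases hg : getR cs minJump maxJump a = true
      · simp only [hg, Bool.true_and, decide_eq_true_eq, loJ, hiJ]
        split_ifs <;> omega
      · rw [Bool.not_eq_true] at hg
        simp [hg])
  omega

theorem countP_range_succ (p : Nat → Bool) (m : Nat) :
    (List.range (m + 1)).countP p = (List.range m).countP p + (if p m then 1 else 0) := by
  rw [List.range_succ, List.countP_append]
  simp [List.countP_cons]

theorem DMm_len (cs : List Char) (minJump maxJump : Int) (m : Nat) :
    (DMm cs minJump maxJump m).length = cs.length + 1 := by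
  simp [DMm]

theorem DMm_zero (cs : List Char) (minJump maxJump : Int) :
    DMm cs minJump maxJump 0 = List.replicate (cs.length + 1) 0 := by
  unfold DMm
  simp [List.map_const']

theorem DMm_succ_stall (cs : List Char) (minJump maxJump : Int) (m : Nat)
    (h : getR cs minJump maxJump m = false ∨
      ¬ (loJ minJump (m : Int) ≤ hiJ maxJump (cs.length : Int) (m : Int))) :
    DMm cs minJump maxJump (m + 1) = DMm cs minJump maxJump m := by
  unfold DMm
  apply List.map_congr_left
  intro k hk
  rw [countP_range_succ, countP_range_succ]
  rcases h with hg | hlh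
  · simp [hg]
  · simp [hlh]

theorem DMm_succ_mark (cs : List Char) (minJump maxJump : Int) (m : Nat)
    (hg : getR cs minJump maxJump m = true)
    (hlh : loJ minJump (m : Int) ≤ hiJ maxJump (cs.length : Int) (m : Int)) :
    DMm cs minJump maxJump (m + 1)
      = PySem.List.pySetD
          (PySem.List.pySetD (DMm cs minJump maxJump m) (loJ minJump (m : Int))
            (PySem.List.pyGetD (DMm cs minJump maxJump m) (loJ minJump (m : Int)) 0 + 1))
          (hiJ maxJump (cs.length : Int) (m : Int) + 1)
          (PySem.List.pyGetD
            (PySem.List.pySetD (DMm cs minJump maxJump m) (loJ minJump (m : Int))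
              (PySem.List.pyGetD (DMm cs minJump maxJump m) (loJ minJump (m : Int)) 0 + 1))
            (hiJ maxJump (cs.length : Int) (m : Int) + 1) 0 - 1) := by
  have hL1 : (m : Int) + 1 ≤ loJ minJump (m : Int) := le_max_left _ _
  have hHn : hiJ maxJump (cs.length : Int) (m : Int) ≤ (cs.length : Int) - 1 :=
    min_le_left _ _
  have hL0 : (0 : Int) ≤ loJ minJump (m : Int) := by omega
  have hH0 : (0 : Int) ≤ hiJ maxJump (cs.length : Int) (m : Int) + 1 := by omega
  have hlen := DMm_len cs minJump maxJump m
  have hLlt : loJ minJump (m : Int) < ((DMm cs minJump maxJump m).length : Int) := by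
    rw [hlen]; omega
  have hHlt : hiJ maxJump (cs.length : Int) (m : Int) + 1
      < ((DMm cs minJump maxJump m).length : Int) := by
    rw [hlen]; omega
  rw [PySem.List.pySetD_of_nonneg _ _ hL0]
  rw [PySem.List.pyGetD_eq_getElem _ _ hL0 hLlt]
  rw [PySem.List.pySetD_of_nonneg _ _ hH0]
  rw [PySem.List.pyGetD_eq_getElem _ _ hH0 (by rw [List.length_set]; exact hHlt)]
  rw [List.getElem_set (by rw [List.length_set]; omega)]
  have hne : ¬ ((loJ minJump (m : Int)).toNat
      = (hiJ maxJump (cs.length : Int) (m : Int) + 1).toNat) := by omega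
  rw [if_neg hne]
  apply List.ext_getElem
  · rw [DMm_len, List.length_set, List.length_set, DMm_len]
  intro k hk1 hk2
  rw [List.getElem_set (by simpa using hk2), List.getElem_set (by
    rw [List.length_set] at hk2; simpa using hk2)]
  have hkn : k < cs.length + 1 := by rw [DMm_len] at hk1; exact hk1
  simp only [DMm, List.getElem_map, List.getElem_range]
  rw [countP_range_succ, countP_range_succ]
  simp only [hg, Bool.true_and, decide_eq_true_eq]
  by_cases hkH : (hiJ maxJump (cs.length : Int) (m : Int) + 1).toNat = k
  · subst hkH
    rw [if_pos rfl]
    rw [if_neg (fun h => absurd h.1 (by omega)), if_pos ⟨by omega, hlh⟩]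
    omega
  · rw [if_neg hkH]
    by_cases hkL : (loJ minJump (m : Int)).toNat = k
    · subst hkL
      rw [if_pos rfl]
      rw [if_pos ⟨by omega, hlh⟩, if_neg (fun h => absurd h.1 (by omega))]
      omega
    · rw [if_neg hkL]
      have hEk : ¬ (loJ minJump (m : Int) = (k : Int)) := by omega
      have hVk : ¬ (hiJ maxJump (cs.length : Int) (m : Int) + 1 = (k : Int)) := by omega
      rw [if_neg (fun h => hEk h.1), if_neg (fun h => hVk h.1)]
      omega


-- B's sweep invariant
theorem B_inv (cs : List Char) (minJump maxJump : Int) (hmin : 0 ≤ minJump)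
    (m : Nat) (hm : m ≤ cs.length) :
    (PySem.List.pyRange 0 (m : Int)).foldl (stepD cs minJump maxJump (cs.length : Int))
        (List.replicate (cs.length + 1) 0, 0, false)
      = (DMm cs minJump maxJump m,
         (Wfn cs minJump maxJump ((m : Int) - 1) : Int),
         decide (1 ≤ m) && getR cs minJump maxJump (m - 1)) := by
  induction m with
  | zero =>
      have h0 : PySem.List.pyRange 0 ((0 : Nat) : Int) = [] := by decide
      rw [h0, List.foldl_nil]
      refine Prod.ext (DMm_zero cs minJump maxJump).symm (Prod.ext ?_ (by simp))
      have : ((0 : Nat) : Int) - 1 = -1 := by decide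
      rw [this, Wfn_nonpos cs minJump maxJump (-1) (by omega)]
      simp
  | succ m ih =>
      have hm' : m ≤ cs.length := by omega
      have hmlt : m < cs.length := by omega
      have hsplit : PySem.List.pyRange 0 ((m + 1 : Nat) : Int)
          = PySem.List.pyRange 0 (m : Int) ++ [(m : Int)] := by
        rw [show ((m + 1 : Nat) : Int) = (m : Int) + 1 by push_cast; ring]
        exact PySem.List.pyRange_one_succ_right (Int.natCast_nonneg m)
      rw [hsplit, List.foldl_append, ih hm', List.foldl_cons, List.foldl_nil]
      have hget : PySem.List.pyGetD (DMm cs minJump maxJump m) ((m : Nat) : Int) 0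
          = (((List.range m).countP (fun j =>
              getR cs minJump maxJump j &&
                decide (loJ minJump (j : Int) = ((m : Nat) : Int) ∧
                  loJ minJump (j : Int) ≤ hiJ maxJump (cs.length : Int) (j : Int)))) : Int)
            - (((List.range m).countP (fun j =>
              getR cs minJump maxJump j &&
                decide (hiJ maxJump (cs.length : Int) (j : Int) + 1 = ((m : Nat) : Int) ∧
                  loJ minJump (j : Int) ≤ hiJ maxJump (cs.length : Int) (j : Int)))) : Int) := by
        rw [PySem.List.pyGetD_eq_getElem _ _ (Int.natCast_nonneg m)
          (by rw [DMm_len]; push_cast; omega)]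
        simp [DMm]
      have hcnt : (Wfn cs minJump maxJump ((m : Int) - 1) : Int)
            + PySem.List.pyGetD (DMm cs minJump maxJump m) ((m : Nat) : Int) 0
          = ((Wfn cs minJump maxJump (m : Int) : Nat) : Int) := by
        rw [hget]
        have := cnt_step cs minJump maxJump m hmlt
        omega
      have hdec : decide (0 < ((Wfn cs minJump maxJump (m : Int) : Nat) : Int))
          = decide (0 < Wfn cs minJump maxJump (m : Int)) := by
        rw [decide_eq_decide]
        omega
      have hok : ((((m : Nat) : Int) == 0)
            || ((PySem.List.pyGet? cs ((m : Nat) : Int) == some '0')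
                && decide (0 < ((Wfn cs minJump maxJump (m : Int) : Nat) : Int))))
          = getR cs minJump maxJump m := by
        by_cases hm0 : m = 0
        · subst hm0
          rw [getR_zero]
          simp
        · have h1 : 1 ≤ m := by omega
          have hz : (((m : Nat) : Int) == 0) = false := by
            rw [beq_eq_false_iff_ne]
            omega
          rw [hz, Bool.false_or, hdec,
            getR_entry cs minJump maxJump m h1 hmlt,
            any_slice_eq_Wfn cs minJump maxJump hmin m h1 hmlt]
      simp only [stepD]
      rw [hcnt, hok]
      by_cases hgm : getR cs minJump maxJump m = true
      · rw [hgm, if_pos rfl]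
        by_cases hlh : loJ minJump (m : Int) ≤ hiJ maxJump (cs.length : Int) (m : Int)
        · rw [if_pos (show max ((m : Int) + 1) ((m : Int) + minJump)
              ≤ min ((cs.length : Int) - 1) ((m : Int) + maxJump) from hlh)]
          refine Prod.ext ?_ (Prod.ext ?_ ?_)
          · exact (DMm_succ_mark cs minJump maxJump m hgm hlh).symm
          · show ((Wfn cs minJump maxJump (m : Int) : Nat) : Int)
              = (Wfn cs minJump maxJump (((m + 1 : Nat) : Int) - 1) : Int)
            congr 2
            push_cast
            ring
          · show true = (decide (1 ≤ m + 1) && getR cs minJump maxJump (m + 1 - 1))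
            simp [hgm]
        · rw [if_neg (show ¬ max ((m : Int) + 1) ((m : Int) + minJump)
              ≤ min ((cs.length : Int) - 1) ((m : Int) + maxJump) from hlh)]
          refine Prod.ext ?_ (Prod.ext ?_ ?_)
          · exact (DMm_succ_stall cs minJump maxJump m (Or.inr hlh)).symm
          · show ((Wfn cs minJump maxJump (m : Int) : Nat) : Int)
              = (Wfn cs minJump maxJump (((m + 1 : Nat) : Int) - 1) : Int)
            congr 2
            push_cast
            ring
          · show true = (decide (1 ≤ m + 1) && getR cs minJump maxJump (m + 1 - 1))
            simp [hgm]
      · rw [Bool.not_eq_true] at hgm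
        rw [hgm, if_neg (by simp)]
        refine Prod.ext ?_ (Prod.ext ?_ ?_)
        · exact (DMm_succ_stall cs minJump maxJump m (Or.inl hgm)).symm
        · show ((Wfn cs minJump maxJump (m : Int) : Nat) : Int)
            = (Wfn cs minJump maxJump (((m + 1 : Nat) : Int) - 1) : Int)
          congr 2
          push_cast
          ring
        · show false = (decide (1 ≤ m + 1) && getR cs minJump maxJump (m + 1 - 1))
          simp [hgm]

theorem lastR (cs : List Char) (minJump maxJump : Int) (hn : 1 ≤ cs.length) :
    PySem.List.pyGetD (Rfold cs minJump maxJump cs.length) (-1) true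
      = getR cs minJump maxJump (cs.length - 1) := by
  have hlen := Rfold_len cs minJump maxJump cs.length
  have hne : Rfold cs minJump maxJump cs.length ≠ [] := by
    intro h
    rw [h] at hlen
    simp at hlen
    omega
  rw [PySem.List.pyGetD_neg_one _ _ hne]
  unfold getR
  rw [List.getLast_eq_getElem]
  have hl : (Rfold cs minJump maxJump cs.length).length = cs.length := by omega
  rw [List.getD_eq_getElem _ false (by omega)]
  simp only [hl]

theorem stepD_ok (cs : List Char) (minJump maxJump n : Int)
    (st : List Int × Int × Bool) (i : Int) :
    (stepD cs minJump maxJump n st i).2.2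
      = ((i == 0) || ((PySem.List.pyGet? cs i == some '0')
          && decide (0 < st.2.1 + PySem.List.pyGetD st.1 i 0))) := by
  simp only [stepD]
  split_ifs <;> rfl

-- ===== VERDICT (by name: the statement is the Claim_ definition above) =====
theorem solution_1274_1_spec : Claim_equal_solution_1274_1 := by
  intro s minJump maxJump _dom hPre
  simp only [Spec_solution_1274_1, solution_1274_1, solution_1274_1_alt]
  obtain ⟨hA, hL⟩ := loop_inv s.toList minJump maxJump hPre s.toList.length
  rw [hA, final_eq _ (by intro h; rw [h] at hL; simp at hL; omega)]
  by_cases hn0 : s.toList.length = 0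
  · rw [hn0, Rfold_zero,
      show PySem.List.pyRange 0 ((0 : Nat) : Int) = [] from by decide,
      List.foldl_nil]
    simp
    decide
  · have hn : 1 ≤ s.toList.length := by omega
    rw [lastR _ _ _ hn]
    have hz : ((s.toList.length : Int) == 0) = false := by
      rw [beq_eq_false_iff_ne]
      omega
    rw [hz, Bool.false_or]
    by_cases hmin : 0 ≤ minJump
    · rw [B_inv s.toList minJump maxJump hmin s.toList.length (le_refl _)]
      rw [show decide (1 ≤ s.toList.length) = true from decide_eq_true hn, Bool.true_and]
    · have htail : '0' ∉ s.toList.tail := by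
        rcases hPre with ⟨h, -⟩ | h
        · exact absurd h hmin
        · exact h
      have hsplit : PySem.List.pyRange 0 ((s.toList.length : Nat) : Int)
          = PySem.List.pyRange 0 ((s.toList.length - 1 : Nat) : Int)
            ++ [((s.toList.length - 1 : Nat) : Int)] := by
        rw [show ((s.toList.length : Nat) : Int)
            = ((s.toList.length - 1 : Nat) : Int) + 1 by omega]
        exact PySem.List.pyRange_one_succ_right (Int.natCast_nonneg _)
      rw [hsplit, List.foldl_append, List.foldl_cons, List.foldl_nil, stepD_ok]
      by_cases hn1 : s.toList.length = 1
      · rw [show s.toList.length - 1 = 0 from by omega, getR_zero]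
        simp
      · have h2 : 2 ≤ s.toList.length := by omega
        have hidx : s.toList.length - 1 < s.toList.length := by omega
        have hc : s.toList[s.toList.length - 1]'hidx ≠ '0' := by
          intro hc0
          apply htail
          rw [← List.drop_one]
          have hmem : (s.toList.drop 1)[s.toList.length - 2]? = some '0' := by
            rw [List.getElem?_drop,
              show 1 + (s.toList.length - 2) = s.toList.length - 1 from by omega,
              List.getElem?_eq_getElem hidx, hc0]
          exact List.mem_of_getElem? hmem
        have hbeq : (PySem.List.pyGet? s.toList ((s.toList.length - 1 : Nat) : Int)
            == some '0') = false := by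
          rw [PySem.List.pyGet?_natCast, List.getElem?_eq_getElem hidx,
            beq_eq_false_iff_ne]
          intro h
          exact hc (Option.some.inj h)
        have hz2 : (((s.toList.length - 1 : Nat) : Int) == 0) = false := by
          rw [beq_eq_false_iff_ne]
          omega
        rw [hz2, Bool.false_or, hbeq, Bool.false_and,
          getR_entry s.toList minJump maxJump (s.toList.length - 1) (by omega) hidx,
          hbeq, Bool.false_and]
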